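-- pv_equiv track=rewrite | github.com/ttzytt/PyAutoGrade | tests/Block 4/tested_code/1140/file_reading.py | specific_word_count
-- ===== SOURCE A (Python) =====
-- def specific_word_count(read_file, word):
--     word_count = 0
--     for line in read_file:
--         words = line.split()
--         for current_word in words:
--             if current_word == word:
--                 word_count += 1
--     return word_count
-- ===== SOURCE B (Python) =====
-- def specific_word_count(read_file, word):
--     tokens = [t for line in read_file for t in line.split()]
--     counts = {}
--     for t in tokens:
--         counts[t] = counts.get(t, 0) + 1
--     return counts.get(word, 0)
-- ===== Notes on version B (the rewrite author's own statement) =====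
-- stated objective: alternative
-- what changed: B flattens all lines into one token list, builds a frequency dictionary of every token in a single pass, and answers with one final lookup, instead of A's nested loops testing each token against `word`.
import Mathlib
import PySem

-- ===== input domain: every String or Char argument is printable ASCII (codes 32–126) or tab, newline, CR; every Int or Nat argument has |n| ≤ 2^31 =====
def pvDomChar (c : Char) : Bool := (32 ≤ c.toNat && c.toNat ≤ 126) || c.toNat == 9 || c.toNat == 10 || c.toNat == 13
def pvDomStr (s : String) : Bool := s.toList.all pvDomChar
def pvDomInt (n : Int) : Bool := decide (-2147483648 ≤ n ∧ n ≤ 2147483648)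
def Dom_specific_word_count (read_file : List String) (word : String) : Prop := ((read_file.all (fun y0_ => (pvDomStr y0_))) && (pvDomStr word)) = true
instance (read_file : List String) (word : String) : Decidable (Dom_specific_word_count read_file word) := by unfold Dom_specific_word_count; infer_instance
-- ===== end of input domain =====

-- B flattens all tokens into one list, builds a frequency dictionary in one pass
-- and answers with a single lookup, instead of A's nested loops comparing each token to `word`.

-- ===== PORT A =====
def specific_word_count (read_file : List String) (word : String) : Int :=
  read_file.foldl (fun word_count line =>
    (PySem.Str.split₀ line).foldl
      (fun wc current_word => if current_word = word then wc + 1 else wc)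
      word_count) 0

-- ===== PORT B =====
def specific_word_count_alt (read_file : List String) (word : String) : Int :=
  let tokens := read_file.flatMap (fun line => PySem.Str.split₀ line)
  let counts := tokens.foldl (fun d t => d.insert t (d.getD t 0 + 1))
    (PySem.Dict.empty : PySem.Dict String Int)
  counts.getD word 0

-- ===== PRECONDITION & SPEC =====
def Spec_specific_word_count (read_file : List String) (word : String) (out : Int) : Prop := out = specific_word_count_alt read_file word
instance (read_file : List String) (word : String) (out : Int) : Decidable (Spec_specific_word_count read_file word out) := by unfold Spec_specific_word_count; infer_instance

-- ===== CLAIM (what is proved, stated in full; the proofs are below) =====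
def Claim_equal_specific_word_count : Prop := ∀ (read_file : List String) (word : String), Dom_specific_word_count read_file word → Spec_specific_word_count read_file word (specific_word_count read_file word)

-- ===== LEMMAS AND PROOFS =====

-- A's inner loop over the tokens of one line counts the occurrences of `word`.
theorem swc_inner (word : String) : ∀ (ws : List String) (acc : Int),
    ws.foldl (fun wc cw => if cw = word then wc + 1 else wc) acc
      = acc + (ws.count word : Int) := by
  intro ws
  induction ws with
  | nil => intro acc; simp
  | cons w rest ih =>
    intro acc
    by_cases h : w = word
    · simp only [List.foldl_cons, h, ih, List.count_cons]
      simp; ring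
    · simp only [List.foldl_cons, if_neg h, ih, List.count_cons]
      simp [h]

-- A's outer loop accumulates the count of `word` over all tokens of all lines.
theorem swc_outer (word : String) : ∀ (rf : List String) (acc : Int),
    rf.foldl (fun word_count line =>
      (PySem.Str.split₀ line).foldl
        (fun wc cw => if cw = word then wc + 1 else wc) word_count) acc
      = acc + ((rf.flatMap (fun line => PySem.Str.split₀ line)).count word : Int) := by
  intro rf
  induction rf with
  | nil => intro acc; simp
  | cons l rest ih =>
    intro acc
    rw [List.foldl_cons, swc_inner, ih, List.flatMap_cons, List.count_append]
    push_cast; ring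

-- ===== VERDICT (by name: the statement is the Claim_ definition above) =====
theorem specific_word_count_spec : Claim_equal_specific_word_count := by
  intro read_file word _
  unfold Spec_specific_word_count specific_word_count specific_word_count_alt
  rw [swc_outer, PySem.Dict.getD_foldl_insert_add_one]
  simp
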